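-- pv_equiv track=rewrite | github.com/skitela/potential-robot | TOOLS/stage1_profile_pack.py | symbol_base
-- ===== SOURCE A (Python) =====
-- from typing import Any, Dict, List, Optional, Tuple
--
-- def symbol_base(sym: Any) -> str:
--     s = str(sym or "").strip().upper()
--     if not s:
--         return ""
--     for sep in (".", "-", "_"):
--         if sep in s:
--             s = s.split(sep, 1)[0]
--     return s
-- ===== SOURCE B (Python) =====
-- def symbol_base(sym):
--     s = str(sym or "").strip().upper()
--     if not s:
--         return ""
--     for i, ch in enumerate(s):
--         if ch in ".-_":
--             return s[:i]
--     return s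
-- ===== Notes on version B (the rewrite author's own statement) =====
-- stated objective: simpler
-- what changed: Replaces the three sequential split passes over the separator tuple by a single left-to-right character scan that truncates at the earliest separator occurrence.
import Mathlib
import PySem

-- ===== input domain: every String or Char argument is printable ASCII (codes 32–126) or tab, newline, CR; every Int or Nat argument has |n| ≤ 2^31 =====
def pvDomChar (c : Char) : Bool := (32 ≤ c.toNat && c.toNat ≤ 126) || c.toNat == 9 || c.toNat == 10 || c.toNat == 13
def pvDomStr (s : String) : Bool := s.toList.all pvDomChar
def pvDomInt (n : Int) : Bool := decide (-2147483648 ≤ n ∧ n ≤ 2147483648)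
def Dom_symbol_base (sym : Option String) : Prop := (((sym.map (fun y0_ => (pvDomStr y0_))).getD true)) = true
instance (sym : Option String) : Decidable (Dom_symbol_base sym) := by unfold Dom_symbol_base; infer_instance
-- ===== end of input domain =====

-- B replaces A's three sequential split passes by one character scan that cuts at the earliest '.', '-' or '_' (objective: simpler).

-- ===== PORT A =====
-- the for-loop over the separator tuple; `s.split(sep, 1)[0]` — split with a nonempty
-- separator always returns `some` of a nonempty list, so the `getD`/`headD` defaults are dead code
def pvLoopA (s : String) : String :=
  [".", "-", "_"].foldl (fun s sep =>
    if PySem.Str.isIn sep s then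
      ((PySem.Str.splitMax? s sep 1).getD []).headD s
    else s) s

def symbol_base (sym : Option String) : String :=
  -- str(sym or ""): None and "" are falsy
  let s0 : String := match sym with
    | none => ""
    | some t => if t = "" then "" else t
  let s := PySem.Str.upper (PySem.Str.strip s0)
  if s = "" then "" else pvLoopA s

-- ===== PORT B =====
-- the `for i, ch in enumerate(s): if ch in ".-_": return s[:i]` scan:
-- `some prefix` = the early `return s[:i]`, `none` = the loop fell through
def pvScanB : List Char → Option (List Char)
  | [] => none
  | c :: rest =>
      if c = '.' || c = '-' || c = '_' then some []
      else (pvScanB rest).map (fun p => c :: p)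

def symbol_base_alt (sym : Option String) : String :=
  let s0 : String := match sym with
    | none => ""
    | some t => if t = "" then "" else t
  let s := PySem.Str.upper (PySem.Str.strip s0)
  if s = "" then "" else
    match pvScanB s.toList with
    | some p => String.ofList p
    | none => s

-- ===== PRECONDITION & SPEC =====
def Spec_symbol_base (sym : Option String) (out : String) : Prop := out = symbol_base_alt sym
instance (sym : Option String) (out : String) : Decidable (Spec_symbol_base sym out) := by unfold Spec_symbol_base; infer_instance

-- ===== CLAIM (what is proved, stated in full; the proofs are below) =====
def Claim_equal_symbol_base : Prop := ∀ (sym : Option String), Dom_symbol_base sym → Spec_symbol_base sym (symbol_base sym)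

-- ===== LEMMAS AND PROOFS =====

-- "keep scanning": the character is none of the three separators
def pvKeep (x : Char) : Bool := !(x == '.' || x == '-' || x == '_')

lemma takeWhile_congr' {α : Type} (p q : α → Bool) (l : List α)
    (h : ∀ x ∈ l, p x = q x) : l.takeWhile p = l.takeWhile q := by
  induction l with
  | nil => rfl
  | cons a rest ih =>
    have ha := h a (by simp)
    simp only [List.takeWhile_cons, ha]
    cases q a
    · simp
    · rw [ih (fun x hx => h x (by simp [hx]))]

-- with maxsplit exhausted (m = 0) and a singleton accumulator, go's result starts with that element
lemma go_zero_head (sep : List Char) (fuel : Nat) (l cur : List Char) (r : List Char) :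
    (PySem.Chars.splitOnMax.go sep fuel 0 l cur [r]).head? = some r := by
  cases fuel <;> cases l <;> simp [PySem.Chars.splitOnMax.go]

-- the head of split(sep, 1) for a single-char separator is the prefix before its first occurrence
lemma go_one_head (c : Char) (fuel : Nat) (l cur : List Char) (h : l.length < fuel) :
    (PySem.Chars.splitOnMax.go [c] fuel 1 l cur []).head? =
      some (cur.reverse ++ l.takeWhile (fun x => x ≠ c)) := by
  induction fuel generalizing l cur with
  | zero => omega
  | succ n ih =>
    cases l with
    | nil => simp [PySem.Chars.splitOnMax.go]
    | cons a rest =>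
      by_cases hac : a = c
      · subst hac
        simp [PySem.Chars.splitOnMax.go, List.isPrefixOf, go_zero_head]
      · have hca : ¬ c = a := fun e => hac e.symm
        have hstep : PySem.Chars.splitOnMax.go [c] (n + 1) 1 (a :: rest) cur [] =
            PySem.Chars.splitOnMax.go [c] n 1 rest (a :: cur) [] := by
          simp [PySem.Chars.splitOnMax.go, List.isPrefixOf, hca]
        rw [hstep, ih rest (a :: cur) (by simpa using Nat.lt_of_succ_lt_succ h)]
        simp [hac]

lemma splitOnMax_one_head (c : Char) (l : List Char) :
    (PySem.Chars.splitOnMax l [c] 1).head? = some (l.takeWhile (fun x => x ≠ c)) := by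
  unfold PySem.Chars.splitOnMax
  simp [go_one_head c (l.length + 1) l [] (by omega)]

-- one iteration of A's loop body is unconditionally a takeWhile past the separator character
lemma stepA_toList (c : Char) (sep : String) (hsep : sep.toList = [c]) (s : String) :
    (if PySem.Str.isIn sep s then
        ((PySem.Str.splitMax? s sep 1).getD []).headD s
      else s).toList = s.toList.takeWhile (fun x => x ≠ c) := by
  by_cases h : PySem.Str.isIn sep s
  · simp only [h, if_true]
    have hb := PySem.Str.splitMax?_map s sep 1
    rw [hsep] at hb
    cases hsp : PySem.Str.splitMax? s sep 1 with
    | none =>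
      rw [hsp] at hb
      simp [PySem.Chars.splitMax?] at hb
    | some parts =>
      rw [hsp] at hb
      simp only [Option.map_some] at hb
      have hmap : parts.map String.toList = PySem.Chars.splitOnMax s.toList [c] 1 := by
        simpa [PySem.Chars.splitMax?] using hb
      have hhead := splitOnMax_one_head c s.toList
      cases parts with
      | nil => rw [← hmap] at hhead; simp at hhead
      | cons p ps =>
        rw [← hmap] at hhead
        simp only [List.map_cons, List.head?_cons, Option.some.injEq] at hhead
        simpa using hhead
  · have hnotmem : c ∉ s.toList := by
      intro hmem
      apply h
      rw [PySem.Str.isIn_eq, hsep]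
      refine (PySem.Chars.isIn_iff_infix _ _).mpr ?_
      obtain ⟨l1, l2, hsplit⟩ := List.mem_iff_append.mp hmem
      exact ⟨l1, l2, by simp [hsplit]⟩
    have hts : s.toList.takeWhile (fun x => x ≠ c) = s.toList := by
      refine List.takeWhile_eq_self_iff.mpr ?_
      intro x hx
      simp only [ne_eq, decide_eq_true_eq]
      exact fun hxc => hnotmem (hxc ▸ hx)
    have h' : PySem.Str.isIn sep s = false := by
      cases hv : PySem.Str.isIn sep s
      · rfl
      · exact absurd hv h
    simp only [h', Bool.false_eq_true, if_false]
    exact hts.symm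

-- B's scan, with its fall-through case, is the takeWhile over "not a separator"
lemma scanB_match (l : List Char) :
    (match pvScanB l with | some p => p | none => l) = l.takeWhile pvKeep := by
  induction l with
  | nil => simp [pvScanB]
  | cons c rest ih =>
    by_cases hc : c = '.' ∨ c = '-' ∨ c = '_'
    · have hb : (c = '.' || c = '-' || c = '_') = true := by
        rcases hc with h | h | h <;> simp [h]
      have hk : pvKeep c = false := by
        simp only [pvKeep, Bool.not_eq_false']
        rcases hc with h | h | h <;> simp [h]
      simp [pvScanB, hb, hk]
    · rw [not_or, not_or] at hc
      obtain ⟨h1, h2, h3⟩ := hc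
      have hb : (c = '.' || c = '-' || c = '_') = false := by simp [h1, h2, h3]
      have hk : pvKeep c = true := by simp [pvKeep, h1, h2, h3]
      simp only [pvScanB, hb, Bool.false_eq_true, if_false]
      cases hs : pvScanB rest with
      | none =>
        rw [hs] at ih
        simp only [Option.map_none, List.takeWhile_cons, hk]
        exact congrArg (c :: ·) ih
      | some p =>
        rw [hs] at ih
        simp only [Option.map_some, List.takeWhile_cons, hk]
        exact congrArg (c :: ·) ih

-- the loop bodies agree on every string
lemma core_eq (s : String) :
    pvLoopA s = match pvScanB s.toList with | some p => String.ofList p | none => s := by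
  have hA : (pvLoopA s).toList = s.toList.takeWhile pvKeep := by
    unfold pvLoopA
    simp only [List.foldl_cons, List.foldl_nil]
    rw [stepA_toList '_' "_" (by decide), stepA_toList '-' "-" (by decide),
        stepA_toList '.' "." (by decide), List.takeWhile_takeWhile, List.takeWhile_takeWhile]
    refine takeWhile_congr' _ _ _ ?_
    intro x _
    by_cases hx1 : x = '.' <;> by_cases hx2 : x = '-' <;> by_cases hx3 : x = '_' <;>
      simp [pvKeep, hx1, hx2, hx3]
  have hB : (match pvScanB s.toList with
      | some p => String.ofList p | none => s).toList = s.toList.takeWhile pvKeep := by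
    rw [← scanB_match s.toList]
    cases pvScanB s.toList with
    | none => rfl
    | some p => simp
  exact String.ext (hA.trans hB.symm)

-- ===== VERDICT (by name: the statement is the Claim_ definition above) =====
theorem symbol_base_spec : Claim_equal_symbol_base := by
  intro sym _
  unfold Spec_symbol_base symbol_base symbol_base_alt
  cases sym with
  | none => simp [core_eq]
  | some t => by_cases ht : t = "" <;> simp [ht, core_eq]
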